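-- pv_equiv track=rewrite | github.com/pavelmorozov/algorithms | src/codility/python/12_Euclidean/ChocolatesByNumbers.py | solution
-- ===== SOURCE A (Python) =====
-- def solution(N, M):
--     circle = [True] * N
--     i = 0
--     count = 0
--     while circle[i]==True:
--         circle[i] = False
--         count+=1
--         i = (i+M) % N
--
--     return count
-- ===== SOURCE B (Python) =====
-- def solution(N, M):
--     # count positions visited = N // gcd(N, M), via the Euclidean algorithm
--     a, b = N, M % N
--     while b:
--         a, b = b, a % b
--     return N // a
-- ===== Notes on version B (the rewrite author's own statement) =====
-- stated objective: faster
-- what changed: Replaces the O(N) simulation that marks every visited cell of a length-N list by the closed form N // gcd(N, M) computed with the Euclidean algorithm.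
import Mathlib
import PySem

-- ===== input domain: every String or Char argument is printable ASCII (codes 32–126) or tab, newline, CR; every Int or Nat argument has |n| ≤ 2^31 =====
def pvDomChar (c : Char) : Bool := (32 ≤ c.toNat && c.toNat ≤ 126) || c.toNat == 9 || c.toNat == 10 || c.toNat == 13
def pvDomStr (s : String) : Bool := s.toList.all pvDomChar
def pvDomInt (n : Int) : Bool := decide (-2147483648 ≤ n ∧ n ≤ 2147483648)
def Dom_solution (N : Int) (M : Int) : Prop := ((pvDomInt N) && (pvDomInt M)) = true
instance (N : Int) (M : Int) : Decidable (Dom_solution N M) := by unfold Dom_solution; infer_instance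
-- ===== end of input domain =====

-- B replaces A's O(N) marking simulation by the closed form N // gcd(N, M) computed
-- with the Euclidean algorithm.

-- ===== PORT A =====
-- helper: the count of True entries strictly drops when a True cell is set to False
-- (termination measure for the while loop; the loop ends when it revisits a False cell)
theorem pvCountSetFalse (l : List Bool) (i : Nat) (h : l.getD i false = true) :
    (l.set i false).count true < l.count true := by
  induction l generalizing i with
  | nil => simp [List.getD] at h
  | cons a t ih =>
    cases i with
    | zero =>
      simp [List.getD] at h
      subst h
      simp
    | succ j =>
      simp [List.getD] at h
      have := ih j h
      rcases Bool.eq_false_or_eq_true a with ha | ha <;>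
        simp [ha] <;> omega

-- Array.getD on a literal array = List.getD on its list (used by the termination proof)
theorem pvArrGetD (l : List Bool) (i : Nat) : (Array.mk l).getD i false = l.getD i false := by
  simp only [Array.getD, List.getD]
  split
  · rename_i h
    rw [List.getElem?_eq_getElem (by simpa using h)]
    simp
  · rename_i h
    rw [List.getElem?_eq_none (by simpa using h)]
    rfl

-- while circle[i]==True: circle[i]=False; count+=1; i=(i+M)%N
-- (a Python list is an array: the circle is an Array Bool with O(1) get/set; on every
-- input A accepts, i stays a nonnegative in-range index, so a Nat index with getD as
-- the totalizing guard is an exact transcription there)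
def solLoop (M N : Int) (circle : Array Bool) (i : Nat) (count : Int) : Int :=
  if h : circle.getD i false = true then
    solLoop M N (circle.setIfInBounds i false) ((PySem.Int.mod ((i : Int) + M) N).toNat) (count + 1)
  else count
termination_by circle.toList.count true
decreasing_by
  have h' : circle.toList.getD i false = true := by
    rw [← pvArrGetD circle.toList i]
    exact h
  have := pvCountSetFalse circle.toList i h'
  simpa using this

def solution (N : Int) (M : Int) : Int :=
  solLoop M N (Array.replicate N.toNat true) 0 0

-- ===== PORT B =====
-- while b: a, b = b, a % b
def gcdLoop (a b : Int) : Int :=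
  if _hb : b = 0 then a else gcdLoop b (PySem.Int.mod a b)
termination_by b.natAbs
decreasing_by
  rcases lt_or_gt_of_ne _hb with h | h
  · have := PySem.Int.mod_neg_bounds a h
    omega
  · have h1 := PySem.Int.mod_nonneg a h
    have h2 := PySem.Int.mod_lt a h
    omega

def solution_alt (N : Int) (M : Int) : Int :=
  PySem.Int.floordiv N (gcdLoop N (PySem.Int.mod M N))

-- ===== PRECONDITION & SPEC =====
-- Pre_ excludes N ≤ 0, where A raises IndexError (circle[0] on an empty list).
def Pre_solution (N : Int) (_M : Int) : Prop := 1 ≤ N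
instance (N : Int) (M : Int) : Decidable (Pre_solution N M) := by unfold Pre_solution; infer_instance
def pvWitness_solution : Int × Int := (10, 4)

def Spec_solution (N : Int) (M : Int) (out : Int) : Prop := out = solution_alt N M
instance (N : Int) (M : Int) (out : Int) : Decidable (Spec_solution N M out) := by unfold Spec_solution; infer_instance

-- ===== CLAIM (what is proved, stated in full; the proofs are below) =====
def Claim_equal_solution : Prop := ∀ (N : Int) (M : Int), Dom_solution N M → Pre_solution N M → Spec_solution N M (solution N M)

-- ===== LEMMAS AND PROOFS =====

theorem pvArrSet (l : List Bool) (i : Nat) (v : Bool) :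
    (Array.mk l).setIfInBounds i v = Array.mk (l.set i v) := by
  apply Array.toList_inj.mp
  simp

-- position after k steps: (k*M) mod N, as a list index
def pvPos (M N : Int) (k : Nat) : Nat := (PySem.Int.mod ((k : Int) * M) N).toNat

-- the circle after k steps: cell j is True iff no earlier step landed on it
def pvCircle (M N : Int) (n k : Nat) : List Bool :=
  (List.range n).map (fun j => ! decide (∃ j' < k, pvPos M N j' = j))

theorem pvPos_lt (M N : Int) (k : Nat) (hN : 0 < N) : pvPos M N k < N.toNat := by
  unfold pvPos
  have h1 := PySem.Int.mod_nonneg ((k : Int) * M) hN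
  have h2 := PySem.Int.mod_lt ((k : Int) * M) hN
  omega

-- two steps land on the same cell iff N divides the difference of the travelled distances
theorem pvPos_eq_iff (M N : Int) (j k : Nat) (hN : 0 < N) :
    pvPos M N j = pvPos M N k ↔ (N ∣ ((j : Int) - k) * M) := by
  unfold pvPos
  rw [PySem.Int.mod_eq_emod_of_pos hN, PySem.Int.mod_eq_emod_of_pos hN]
  have hN0 : N ≠ 0 := by omega
  have hj := Int.emod_nonneg ((j : Int) * M) hN0
  have hk := Int.emod_nonneg ((k : Int) * M) hN0
  constructor
  · intro h
    have heq : (j : Int) * M % N = (k : Int) * M % N := by omega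
    have hz : ((j : Int) * M - (k : Int) * M) % N = 0 :=
      Int.emod_eq_emod_iff_emod_sub_eq_zero.mp heq
    have := Int.dvd_of_emod_eq_zero hz
    convert this using 1
    ring
  · intro h
    have hz : ((j : Int) * M - (k : Int) * M) % N = 0 := by
      apply Int.emod_eq_zero_of_dvd
      convert h using 1
      ring
    have := Int.emod_eq_emod_iff_emod_sub_eq_zero.mpr hz
    omega

theorem pvGcd_dvd_toNat (N M : Int) (hN : 0 < N) : Int.gcd N M ∣ N.toNat := by
  have h : N.natAbs = N.toNat := by omega
  rw [Int.gcd_def, h]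
  exact Nat.gcd_dvd_left _ _

theorem pvGcd_pos (N M : Int) (hN : 0 < N) : 0 < Int.gcd N M := by
  rw [Int.gcd_def]
  exact Nat.gcd_pos_of_pos_left _ (by omega)

theorem pvL_pos (N M : Int) (hN : 0 < N) : 0 < N.toNat / Int.gcd N M :=
  Nat.div_pos (Nat.le_of_dvd (by omega) (pvGcd_dvd_toNat N M hN)) (pvGcd_pos N M hN)

-- the first N/gcd(N,M) positions are pairwise distinct
theorem pv_distinct (M N : Int) (hN : 0 < N) (j k : Nat) (hjk : j < k)
    (hk : k < N.toNat / Int.gcd N M) : pvPos M N j ≠ pvPos M N k := by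
  intro h
  have hdvd : (N ∣ ((j : Int) - k) * M) := (pvPos_eq_iff M N j k hN).mp h
  have hdvd' : (N ∣ ((k : Int) - j) * M) := by
    rcases hdvd with ⟨t, ht⟩
    exact ⟨-t, by linarith [ht]⟩
  -- move to Nat
  have hcast : ((k - j : Nat) : Int) * M = ((k : Int) - j) * M := by
    push_cast [Nat.cast_sub hjk.le]
    ring
  have hNat : N.toNat ∣ (k - j) * M.natAbs := by
    have h1 : N ∣ ((k - j : Nat) : Int) * M := by
      rw [hcast]
      exact hdvd'
    have h2 := Int.natAbs_dvd_natAbs.mpr h1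
    have h3 : N.natAbs = N.toNat := by omega
    simpa [Int.natAbs_mul, h3] using h2
  set n := N.toNat with hn
  set Mn := M.natAbs with hMn
  set g := Int.gcd N M with hg
  have hgdef : g = Nat.gcd n Mn := by
    rw [hg, Int.gcd_def, hMn]
    congr 1
    omega
  have hgpos : 0 < g := pvGcd_pos N M hN
  have hgn : g ∣ n := pvGcd_dvd_toNat N M hN
  have hgm : g ∣ Mn := by rw [hgdef]; exact Nat.gcd_dvd_right n Mn
  obtain ⟨n', hn'⟩ := hgn
  obtain ⟨m', hm'⟩ := hgm
  have hcop : Nat.Coprime n' m' := by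
    have := Nat.coprime_div_gcd_div_gcd (m := n) (n := Mn) (by rw [← hgdef]; exact hgpos)
    rw [← hgdef, hn', hm', Nat.mul_div_cancel_left _ hgpos, Nat.mul_div_cancel_left _ hgpos] at this
    exact this
  obtain ⟨t, ht⟩ := hNat
  have ht' : (k - j) * m' = n' * t := by
    have hcalc : g * ((k - j) * m') = g * (n' * t) := by
      calc g * ((k - j) * m') = (k - j) * (g * m') := by ring
        _ = (k - j) * Mn := by rw [← hm']
        _ = n * t := ht
        _ = (g * n') * t := by rw [← hn']
        _ = g * (n' * t) := by ring
    exact Nat.eq_of_mul_eq_mul_left hgpos hcalc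
  have hdvd2 : n' ∣ (k - j) := hcop.dvd_of_dvd_mul_right ⟨t, ht'⟩
  have hL : n / g = n' := by rw [hn', Nat.mul_div_cancel_left _ hgpos]
  have hle : n' ≤ k - j := Nat.le_of_dvd (by omega) hdvd2
  omega

-- after N/gcd(N,M) steps the walk is back at cell 0
theorem pv_period (M N : Int) (hN : 0 < N) :
    pvPos M N 0 = pvPos M N (N.toNat / Int.gcd N M) := by
  rw [pvPos_eq_iff M N _ _ hN]
  set g := Int.gcd N M with hg
  have hgn : g ∣ N.toNat := pvGcd_dvd_toNat N M hN
  have hgpos : 0 < g := pvGcd_pos N M hN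
  have hgM : ((g : Nat) : Int) ∣ M := Int.gcd_dvd_right N M
  obtain ⟨M', hM'⟩ := hgM
  have hNeq : N = ((g : Nat) : Int) * ((N.toNat / g : Nat) : Int) := by
    have : g * (N.toNat / g) = N.toNat := Nat.mul_div_cancel' hgn
    have h2 : ((g * (N.toNat / g) : Nat) : Int) = N := by rw [this]; omega
    push_cast at h2
    omega
  refine ⟨-M', ?_⟩
  have key : N * -M' = -((g : Int) * ((N.toNat / g : Nat) : Int) * M') := by
    conv_lhs => rw [hNeq]
    ring
  rw [hM', key]
  push_cast
  ring

theorem pvCircle_zero (M N : Int) (n : Nat) : pvCircle M N n 0 = List.replicate n true := by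
  unfold pvCircle
  apply List.ext_getElem <;> simp

theorem pvCircle_getD (M N : Int) (n k i : Nat) (hi : i < n) :
    (pvCircle M N n k).getD i false = ! decide (∃ j' < k, pvPos M N j' = i) := by
  unfold pvCircle
  rw [List.getD_eq_getElem?_getD]
  simp [hi]

theorem pvCircle_set (M N : Int) (n k : Nat) (h : pvPos M N k < n) :
    (pvCircle M N n k).set (pvPos M N k) false = pvCircle M N n (k + 1) := by
  apply List.ext_getElem
  · simp [pvCircle]
  · intro i h1 h2
    simp only [pvCircle, List.getElem_set, List.getElem_map, List.getElem_range] at *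
    by_cases hip : pvPos M N k = i
    · rw [if_pos hip]
      have hex : ∃ j' < k + 1, pvPos M N j' = i := ⟨k, Nat.lt_succ_self k, hip⟩
      rw [decide_eq_true hex, Bool.not_true]
    · rw [if_neg hip]
      congr 1
      simp only [decide_eq_decide]
      constructor
      · rintro ⟨j', hj', hp⟩
        exact ⟨j', by omega, hp⟩
      · rintro ⟨j', hj', hp⟩
        refine ⟨j', ?_, hp⟩
        by_cases he : j' = k
        · subst he
          exact absurd hp hip
        · omega

-- one emod step of the walk
theorem pv_step (M N : Int) (k : Nat) (hN : 0 < N) :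
    (PySem.Int.mod ((pvPos M N k : Int) + M) N).toNat = pvPos M N (k + 1) := by
  unfold pvPos
  rw [PySem.Int.mod_eq_emod_of_pos hN, PySem.Int.mod_eq_emod_of_pos hN, PySem.Int.mod_eq_emod_of_pos hN]
  have hN0 : N ≠ 0 := by omega
  have h0 : ((((k : Int) * M % N).toNat : Int)) = (k : Int) * M % N :=
    Int.toNat_of_nonneg (Int.emod_nonneg _ hN0)
  rw [h0]
  congr 1
  rw [Int.add_emod ((k : Int) * M % N) M, Int.emod_emod_of_dvd _ (dvd_refl N), ← Int.add_emod]
  congr 1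
  push_cast
  ring

-- loop invariant: from the state after k steps the loop returns N/gcd(N,M)
theorem pv_loop_eq (M N : Int) (hN : 0 < N) :
    ∀ d k, k ≤ N.toNat / Int.gcd N M → N.toNat / Int.gcd N M - k = d →
    solLoop M N (Array.mk (pvCircle M N N.toNat k)) (pvPos M N k) (k : Int) =
      ((N.toNat / Int.gcd N M : Nat) : Int) := by
  intro d
  induction d with
  | zero =>
    intro k hk hd
    have hkL : k = N.toNat / Int.gcd N M := by omega
    rw [solLoop]
    have hlt := pvPos_lt M N k hN
    rw [pvArrGetD, pvCircle_getD M N _ k _ hlt]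
    have hex : ∃ j' < k, pvPos M N j' = pvPos M N k := by
      refine ⟨0, ?_, ?_⟩
      · have := pvL_pos N M hN; omega
      · rw [hkL]; exact pv_period M N hN
    rw [decide_eq_true hex, Bool.not_true]
    rw [dif_neg (by simp), hkL]
  | succ d ih =>
    intro k hk hd
    have hkL : k < N.toNat / Int.gcd N M := by omega
    rw [solLoop]
    have hlt := pvPos_lt M N k hN
    rw [pvArrGetD, pvCircle_getD M N _ k _ hlt]
    have hnex : ¬ ∃ j' < k, pvPos M N j' = pvPos M N k := by
      rintro ⟨j', hj', hp⟩
      exact pv_distinct M N hN j' k hj' hkL hp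
    simp only [hnex, decide_false, Bool.not_false, dite_true]
    rw [pvArrSet, pvCircle_set M N _ k hlt, pv_step M N k hN]
    have : (k : Int) + 1 = ((k + 1 : Nat) : Int) := by push_cast; ring
    rw [this]
    exact ih (k + 1) (by omega) (by omega)

-- gcd is preserved by one Euclidean step
theorem pv_gcd_emod (a b : Int) : Int.gcd b (a % b) = Int.gcd a b := by
  apply Nat.dvd_antisymm
  · have d1 := Int.gcd_dvd_left b (a % b)
    have d2 := Int.gcd_dvd_right b (a % b)
    have ha : (↑(Int.gcd b (a % b)) : Int) ∣ a := by
      have hsum := dvd_add (Dvd.dvd.mul_right d1 (a / b)) d2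
      rwa [Int.mul_ediv_add_emod a b] at hsum
    exact Int.dvd_gcd ha d1
  · have d1 := Int.gcd_dvd_left a b
    have d2 := Int.gcd_dvd_right a b
    have hm : (↑(Int.gcd a b) : Int) ∣ a % b := by
      rw [Int.emod_def]
      exact dvd_sub d1 (Dvd.dvd.mul_right d2 _)
    exact Int.dvd_gcd d2 hm

theorem pv_gcdLoop (bn : Nat) : ∀ b : Int, 0 ≤ b → b.toNat = bn → ∀ a : Int, 0 < a →
    gcdLoop a b = Int.gcd a b := by
  induction bn using Nat.strong_induction_on with
  | _ bn ih =>
    intro b hb hbn a ha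
    rw [gcdLoop]
    by_cases h0 : b = 0
    · subst h0
      simp [Int.natAbs_of_nonneg (le_of_lt ha)]
    · have hbpos : 0 < b := by omega
      rw [dif_neg h0, PySem.Int.mod_eq_emod_of_pos hbpos]
      have hmlt : (a % b).toNat < bn := by
        have := Int.emod_lt_of_pos a hbpos
        have := Int.emod_nonneg a h0
        omega
      rw [ih _ hmlt (a % b) (Int.emod_nonneg a h0) rfl b hbpos]
      exact congrArg Nat.cast (pv_gcd_emod a b)

-- ===== VERDICT (by name: the statement is the Claim_ definition above) =====
theorem solution_spec : Claim_equal_solution := by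
  intro N M _ hpre
  have hN : 0 < N := hpre
  unfold Spec_solution solution solution_alt
  -- left side: the simulation returns N/gcd(N,M)
  have hpos0 : pvPos M N 0 = 0 := by
    unfold pvPos
    rw [PySem.Int.mod_eq_emod_of_pos hN]
    simp
  have hA : solLoop M N (Array.replicate N.toNat true) 0 0 =
      ((N.toNat / Int.gcd N M : Nat) : Int) := by
    have := pv_loop_eq M N hN (N.toNat / Int.gcd N M) 0 (Nat.zero_le _) (Nat.sub_zero _)
    rwa [pvCircle_zero, hpos0, show Array.mk (List.replicate N.toNat true) = Array.replicate N.toNat true from (Array.replicate_eq_toArray_replicate).symm] at this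
  rw [hA]
  -- right side: the Euclidean algorithm returns gcd(N,M)
  have hMm : 0 ≤ PySem.Int.mod M N := PySem.Int.mod_nonneg M hN
  have hB : gcdLoop N (PySem.Int.mod M N) = Int.gcd N M := by
    rw [pv_gcdLoop (PySem.Int.mod M N).toNat _ hMm rfl N hN,
        PySem.Int.mod_eq_emod_of_pos hN, pv_gcd_emod M N, Int.gcd_comm]
  rw [hB]
  have hgpos : (0 : Int) < (Int.gcd N M : Nat) := by
    have := pvGcd_pos N M hN
    omega
  rw [PySem.Int.floordiv_eq_ediv_of_pos hgpos, Int.natCast_ediv, Int.toNat_of_nonneg (by omega : (0:Int) ≤ N)]
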